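-- pv_equiv track=rewrite | github.com/ishay970/exercise1 | exercise1_208306233.py | find_ssr
-- ===== SOURCE A (Python) =====
-- def find_ssr(dna_sec):
--     """  The function receives an input of a genetic sequence
--          and returns a dictionary of the number of repetitions
--          of each segment up to 6 nucleotides long
--     :param dna_sec: a given sequence
--     :return: dict: A dictionary that contains as a key is all sequences of length 1-6 that repeat at least 3 times,
--                     and as a value - number of repetitions
--     """
--     dict = {}                      #The dictionary that the function will return
--     counter = 1                    #number of reapits
--     string = dna_sec               #the secuens that we check whether it contains SSR
--
--     for n in range(1, 7) :
--         for index in range(len(string) - n):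
--             counter = 1
--             ssr_length = string[index: index+n]                #the SSR that we checking
--             if string[index+n: index + (2*n)] == ssr_length:
--                 for k in range(len(string)//n) :
--                     if string[index+n + k*n: index+n +(k+1)*n] == ssr_length: #We found an SSR with 3 repeats
--                         counter += 1
--                     else:
--                         break
--                 if counter >= 3 :                    #We will add the SSR to the dictionary
--                     if dict.get(ssr_length,0) == 0 :
--                         dict[ssr_length] = counter
--                     elif counter > dict.get(ssr_length):
--                         dict[ssr_length] = counter
--     if not any(dict):                                #We did not find any SSR
--         return None
--
--     return (dict)
-- ===== SOURCE B (Python) =====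
-- def find_ssr(dna_sec):
--     """Per-length right-to-left DP: run[i] = run[i+n] + 1 when the block at i
--     equals the block at i+n, giving the tandem-repeat count at every start in
--     one linear pass per length (n = 1..6)."""
--     s = dna_sec
--     length = len(s)
--     result = {}
--     for n in range(1, 7):
--         run = [1] * length
--         for i in reversed(range(length - 2 * n + 1)):
--             if s[i:i + n] == s[i + n:i + 2 * n]:
--                 run[i] = run[i + n] + 1
--         for i in range(length - n):
--             c = run[i]
--             if c >= 3 and c > result.get(s[i:i + n], 0):
--                 result[s[i:i + n]] = c
--     return result or None
-- ===== Notes on version B (the rewrite author's own statement) =====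
-- stated objective: faster
-- what changed: Replaces A's per-start inner rescan of up to len//n blocks by a per-length right-to-left DP (run[i] = run[i+n] + 1 when adjacent blocks match), so each length-n pass is linear instead of quadratic.
import Mathlib
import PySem

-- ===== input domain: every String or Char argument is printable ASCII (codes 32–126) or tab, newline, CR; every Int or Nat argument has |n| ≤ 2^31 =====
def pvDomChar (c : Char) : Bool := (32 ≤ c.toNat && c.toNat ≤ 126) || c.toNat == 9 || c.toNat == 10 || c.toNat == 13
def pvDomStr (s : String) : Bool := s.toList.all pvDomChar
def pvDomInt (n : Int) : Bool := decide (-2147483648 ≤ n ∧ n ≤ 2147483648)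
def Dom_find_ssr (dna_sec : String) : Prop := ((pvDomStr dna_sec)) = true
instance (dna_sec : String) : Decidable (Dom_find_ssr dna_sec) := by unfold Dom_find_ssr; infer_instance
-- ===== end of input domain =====

-- B replaces A's per-start rescan of all following blocks by a per-length right-to-left DP
-- (run[i] = run[i+n] + 1 when adjacent blocks match); objective: faster (asymptotic, O(L^2) → O(L)).

-- ===== PORT A =====
-- inner 'for k in range(len(string)//n)' loop body: counts matching blocks, flag = broken out
def aScan (s : String) (n index : Int) (ssr_length : String) (st : Int × Bool) (k : Int) :
    Int × Bool :=
  if st.2 then st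
  else if PySem.Str.slice s (some (index + n + k * n)) (some (index + n + (k + 1) * n)) == ssr_length
  then (st.1 + 1, false)
  else (st.1, true)

-- body of 'for index in range(len(string) - n)'
def aStep (s : String) (n : Int) (d : PySem.Dict String Int) (index : Int) :
    PySem.Dict String Int :=
  let ssr_length := PySem.Str.slice s (some index) (some (index + n))
  if PySem.Str.slice s (some (index + n)) (some (index + 2 * n)) == ssr_length then
    let counter : Int :=
      (List.foldl (aScan s n index ssr_length) (1, false)
        (PySem.List.pyRange 0 (PySem.Int.floordiv (PySem.Str.len s) n) 1)).1
    if counter ≥ 3 then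
      if d.getD ssr_length 0 == 0 then d.insert ssr_length counter
      -- A's elif reads dict.get(ssr_length); it is reached only with the key present,
      -- where dict.get(k) = dict.get(k, 0) = getD k 0
      else if counter > d.getD ssr_length 0 then d.insert ssr_length counter
      else d
    else d
  else d

def aInner (s : String) (n : Int) (d : PySem.Dict String Int) : PySem.Dict String Int :=
  List.foldl (aStep s n) d (PySem.List.pyRange 0 (PySem.Str.len s - n) 1)

def find_ssr (dna_sec : String) : Option (List (String × Int)) :=
  let dict := List.foldl (fun d n => aInner dna_sec n d) PySem.Dict.empty
    (PySem.List.pyRange 1 7 1)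
  -- 'if not any(dict)': any(dict) iterates the keys testing truthiness (nonempty string)
  if (dict.keys.any fun k => !(PySem.Str.len k == 0)) = false then none
  else some dict.items

-- ===== PORT B =====
-- body of 'for i in reversed(range(length - 2*n + 1))': run[i] = run[i+n] + 1 on block match
def bDpStep (s : String) (n : Int) (run : List Int) (i : Nat) : List Int :=
  if PySem.Str.slice s (some (i : Int)) (some ((i : Int) + n)) ==
     PySem.Str.slice s (some ((i : Int) + n)) (some ((i : Int) + 2 * n)) then
    PySem.List.pySetD run (i : Int) (PySem.List.pyGetD run ((i : Int) + n) 1 + 1)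
  else run

-- 'run = [1] * length' then the right-to-left DP pass
def bRun (s : String) (n : Int) : List Int :=
  List.foldl (bDpStep s n) (List.replicate (PySem.Str.len s).toNat 1)
    (List.range ((PySem.Str.len s) - 2 * n + 1).toNat).reverse

-- body of 'for i in range(length - n)'
def bStep (s : String) (n : Int) (run : List Int) (result : PySem.Dict String Int) (i : Int) :
    PySem.Dict String Int :=
  let c := PySem.List.pyGetD run i 1
  if c ≥ 3 ∧ c > result.getD (PySem.Str.slice s (some i) (some (i + n))) 0 then
    result.insert (PySem.Str.slice s (some i) (some (i + n))) c
  else result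

def bInner (s : String) (n : Int) (result : PySem.Dict String Int) : PySem.Dict String Int :=
  List.foldl (bStep s n (bRun s n)) result (PySem.List.pyRange 0 (PySem.Str.len s - n) 1)

def find_ssr_alt (dna_sec : String) : Option (List (String × Int)) :=
  let result := List.foldl (fun d n => bInner dna_sec n d) PySem.Dict.empty
    (PySem.List.pyRange 1 7 1)
  -- 'return result or None'
  if result.items = [] then none else some result.items

-- ===== PRECONDITION & SPEC =====
def Spec_find_ssr (dna_sec : String) (out : Option (List (String × Int))) : Prop := out = find_ssr_alt dna_sec
instance (dna_sec : String) (out : Option (List (String × Int))) : Decidable (Spec_find_ssr dna_sec out) := by unfold Spec_find_ssr; infer_instance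

-- ===== CLAIM (what is proved, stated in full; the proofs are below) =====
def Claim_equal_find_ssr : Prop := ∀ (dna_sec : String), Dom_find_ssr dna_sec → Spec_find_ssr dna_sec (find_ssr dna_sec)

-- ===== LEMMAS AND PROOFS =====

-- number of further length-n copies of ssr, laid end to end from position j
def chainC (cs : List Char) (n : Nat) (ssr : List Char) (j : Nat) : Nat :=
  if h : 0 < n ∧ j + n ≤ cs.length ∧ (cs.drop j).take n = ssr then
    chainC cs n ssr (j + n) + 1
  else 0
termination_by cs.length - j
decreasing_by obtain ⟨h1, h2, -⟩ := h; omega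

-- tandem-repeat count of the length-n block starting at i
def CvalN (cs : List Char) (n i : Nat) : Nat :=
  1 + chainC cs n ((cs.drop i).take n) (i + n)

-- consecutive blocks (from the (j)-th after the first) equal to the block at i, capped at m
def streak (cs : List Char) (n i : Nat) : Nat → Nat → Nat
  | 0, _ => 0
  | m + 1, j =>
    if (cs.drop (i + n + j * n)).take n = (cs.drop i).take n then
      streak cs n i m (j + 1) + 1
    else 0

theorem slice_beq (s : String) (a b a' b' : Int) (p i n : Nat) (ha : a = (p : Int))
    (hb : b = (p : Int) + (n : Int)) (ha' : a' = (i : Int)) (hb' : b' = (i : Int) + (n : Int)) :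
    (PySem.Str.slice s (some a) (some b) == PySem.Str.slice s (some a') (some b'))
    = decide ((s.toList.drop p).take n = (s.toList.drop i).take n) := by
  subst ha hb ha' hb'
  rw [Bool.eq_iff_iff, beq_iff_eq, decide_eq_true_eq, ← String.toList_inj,
    PySem.Str.toList_slice, PySem.Str.toList_slice, PySem.Chars.slice_eq_listSlice,
    PySem.Chars.slice_eq_listSlice, PySem.List.slice_natCast_add, PySem.List.slice_natCast_add]

theorem cond_of_eq {cs : List Char} {n : Nat} {ssr : List Char} (hn : 0 < n)
    (hssr : ssr.length = n) {j : Nat} (hc : (cs.drop j).take n = ssr) :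
    j + n ≤ cs.length := by
  have := congrArg List.length hc
  simp only [List.length_take, List.length_drop, hssr] at this
  omega

theorem chainC_eq {cs : List Char} {n : Nat} {ssr : List Char} (hn : 0 < n)
    (hssr : ssr.length = n) (j : Nat) :
    chainC cs n ssr j =
      if (cs.drop j).take n = ssr then chainC cs n ssr (j + n) + 1 else 0 := by
  rw [chainC]
  by_cases hc : (cs.drop j).take n = ssr
  · rw [dif_pos ⟨hn, cond_of_eq hn hssr hc, hc⟩, if_pos hc]
  · rw [dif_neg (by tauto), if_neg hc]

theorem chainC_le (cs : List Char) (n : Nat) (ssr : List Char) (hn : 0 < n) :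
    ∀ j, chainC cs n ssr j ≤ (cs.length - j) / n := by
  have key : ∀ m j, cs.length - j ≤ m → chainC cs n ssr j ≤ (cs.length - j) / n := by
    intro m
    induction m with
    | zero =>
      intro j hj
      rw [chainC, dif_neg]
      · exact Nat.zero_le _
      · rintro ⟨h1, h2, -⟩; omega
    | succ m ih =>
      intro j hj
      rw [chainC]
      split_ifs with h
      · obtain ⟨h1, h2, -⟩ := h
        have hrec := ih (j + n) (by omega)
        have hdiv : (cs.length - j) / n = (cs.length - (j + n)) / n + 1 := by
          rw [show cs.length - j = (cs.length - (j + n)) + n by omega, Nat.add_div_right _ hn]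
        omega
      · exact Nat.zero_le _
  exact fun j => key (cs.length - j) j le_rfl

theorem aScan_stuck (s : String) (n index : Int) (ssr : String) :
    ∀ (l : List Int) (c : Int), List.foldl (aScan s n index ssr) (c, true) l = (c, true) := by
  intro l
  induction l with
  | nil => intro c; rfl
  | cons x xs ih => intro c; rw [List.foldl_cons, show aScan s n index ssr (c, true) x = (c, true) from rfl, ih]

theorem loop_count (s : String) (nn ii : Nat) :
    ∀ (m j : Nat) (c : Int),
      (List.foldl (aScan s (nn : Int) (ii : Int)
          (PySem.Str.slice s (some (ii : Int)) (some ((ii : Int) + (nn : Int))))) (c, false)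
        ((List.range' j m).map (fun (k : Nat) => (k : Int)))).1
      = c + (streak s.toList nn ii m j : Int) := by
  intro m
  induction m with
  | zero => intro j c; simp [streak]
  | succ m ih =>
    intro j c
    rw [List.range'_succ, List.map_cons, List.foldl_cons]
    have hbeq := slice_beq s ((ii : Int) + (nn : Int) + (j : Int) * (nn : Int))
      ((ii : Int) + (nn : Int) + ((j : Int) + 1) * (nn : Int))
      ((ii : Int)) ((ii : Int) + (nn : Int)) (ii + nn + j * nn) ii nn
      (by push_cast; ring) (by push_cast; ring) rfl rfl
    have hcond : aScan s (nn : Int) (ii : Int)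
        (PySem.Str.slice s (some (ii : Int)) (some ((ii : Int) + (nn : Int)))) (c, false) (j : Int)
        = if (s.toList.drop (ii + nn + j * nn)).take nn = (s.toList.drop ii).take nn
          then (c + 1, false) else (c, true) := by
      simp only [aScan, hbeq, decide_eq_true_eq]
      rfl
    rw [hcond]
    have hs : streak s.toList nn ii (m + 1) j
        = if (s.toList.drop (ii + nn + j * nn)).take nn = (s.toList.drop ii).take nn
          then streak s.toList nn ii m (j + 1) + 1 else 0 := rfl
    by_cases hm : (s.toList.drop (ii + nn + j * nn)).take nn = (s.toList.drop ii).take nn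
    · rw [if_pos hm, ih (j + 1) (c + 1), hs, if_pos hm]
      push_cast; ring
    · rw [if_neg hm, aScan_stuck, hs, if_neg hm]
      simp

theorem streak_eq_chain {cs : List Char} {nn ii : Nat} (hn : 0 < nn)
    (hssr : ((cs.drop ii).take nn).length = nn) :
    ∀ m j, chainC cs nn ((cs.drop ii).take nn) (ii + nn + j * nn) < m →
      streak cs nn ii m j = chainC cs nn ((cs.drop ii).take nn) (ii + nn + j * nn) := by
  intro m
  induction m with
  | zero => intro j h; omega
  | succ m ih =>
    intro j h
    rw [chainC_eq hn hssr] at h ⊢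
    have hs : streak cs nn ii (m + 1) j
        = if (cs.drop (ii + nn + j * nn)).take nn = (cs.drop ii).take nn
          then streak cs nn ii m (j + 1) + 1 else 0 := rfl
    by_cases hc : (cs.drop (ii + nn + j * nn)).take nn = (cs.drop ii).take nn
    · rw [if_pos hc] at h ⊢
      have e : ii + nn + j * nn + nn = ii + nn + (j + 1) * nn := by ring
      rw [e] at h ⊢
      rw [hs, if_pos hc, ih (j + 1) (by omega)]
    · rw [if_neg hc] at h ⊢
      rw [hs, if_neg hc]

theorem counter_eq (s : String) (nn ii : Nat) (hn : 0 < nn)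
    (hiL : ii + nn < s.toList.length) :
    (List.foldl (aScan s (nn : Int) (ii : Int)
        (PySem.Str.slice s (some (ii : Int)) (some ((ii : Int) + (nn : Int))))) (1, false)
      (PySem.List.pyRange 0 (PySem.Int.floordiv (PySem.Str.len s) (nn : Int)) 1)).1
    = 1 + (chainC s.toList nn ((s.toList.drop ii).take nn) (ii + nn) : Int) := by
  have hssr : ((s.toList.drop ii).take nn).length = nn := by
    simp only [List.length_take, List.length_drop]; omega
  rw [PySem.Str.len_eq, PySem.Int.floordiv_natCast, PySem.List.pyRange_zero_natCast,
    List.range_eq_range', loop_count s nn ii (s.toList.length / nn) 0 1]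
  have hb : chainC s.toList nn ((s.toList.drop ii).take nn) (ii + nn + 0 * nn)
      < s.toList.length / nn := by
    have h1 := chainC_le s.toList nn ((s.toList.drop ii).take nn) hn (ii + nn)
    have h2 : (s.toList.length - (ii + nn)) / nn ≤ (s.toList.length - nn) / nn :=
      Nat.div_le_div_right (by omega)
    have h3 : (s.toList.length - nn + nn) / nn = (s.toList.length - nn) / nn + 1 :=
      Nat.add_div_right _ hn
    have h4 : s.toList.length - nn + nn = s.toList.length := by omega
    rw [h4] at h3
    simp only [Nat.zero_mul, Nat.add_zero]
    omega
  rw [streak_eq_chain hn hssr (s.toList.length / nn) 0 hb]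
  simp

theorem update_eq (d : PySem.Dict String Int) (k : String) (c : Int) :
    (if c ≥ 3 then
        if d.getD k 0 == 0 then d.insert k c
        else if c > d.getD k 0 then d.insert k c
        else d
      else d)
    = if c ≥ 3 ∧ c > d.getD k 0 then d.insert k c else d := by
  by_cases h3 : c ≥ 3
  · by_cases h0 : d.getD k 0 = 0
    · rw [if_pos h3, if_pos (by simp [h0]), if_pos ⟨h3, by omega⟩]
    · rw [if_pos h3, if_neg (by simp [h0])]
      by_cases hgt : c > d.getD k 0
      · rw [if_pos hgt, if_pos ⟨h3, hgt⟩]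
      · rw [if_neg hgt, if_neg (by tauto)]
  · rw [if_neg h3, if_neg (by tauto)]

theorem Cval_of_eq {cs : List Char} {nn k : Nat} (hn : 0 < nn) (hk : k + 2 * nn ≤ cs.length)
    (hc : (cs.drop k).take nn = (cs.drop (k + nn)).take nn) :
    CvalN cs nn k = CvalN cs nn (k + nn) + 1 := by
  have hssr : ((cs.drop k).take nn).length = nn := by
    simp only [List.length_take, List.length_drop]; omega
  unfold CvalN
  rw [chainC_eq hn hssr (k + nn), if_pos hc.symm, hc,
    show k + nn + nn = k + nn + nn from rfl]
  omega

theorem Cval_one_of_far {cs : List Char} {nn k : Nat}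
    (hfar : ¬(k + 2 * nn ≤ cs.length ∧ (cs.drop k).take nn = (cs.drop (k + nn)).take nn)) :
    CvalN cs nn k = 1 := by
  unfold CvalN
  rw [chainC, dif_neg]
  rintro ⟨h1, h2, h3⟩
  exact hfar ⟨by omega, h3.symm⟩

theorem dp_invar (s : String) (nn : Nat) (hn : 0 < nn) :
    ∀ (k : Nat) (r : List Int),
      (k ≠ 0 → k + 2 * nn ≤ s.toList.length + 1) → r.length = s.toList.length →
      (∀ j, j < s.toList.length →
        r.getD j 1 = if k ≤ j then (CvalN s.toList nn j : Int) else 1) →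
      (List.foldl (bDpStep s (nn : Int)) r (List.range k).reverse).length = s.toList.length ∧
      ∀ j, j < s.toList.length →
        (List.foldl (bDpStep s (nn : Int)) r (List.range k).reverse).getD j 1
          = (CvalN s.toList nn j : Int) := by
  intro k
  induction k with
  | zero =>
    intro r _ hlen hr
    refine ⟨by simpa using hlen, fun j hj => ?_⟩
    simpa using (hr j hj).trans (by rw [if_pos (Nat.zero_le j)])
  | succ k ih =>
    intro r hk hlen hr
    have hkL : k + 2 * nn ≤ s.toList.length := by have := hk (by omega); omega
    rw [List.range_succ, List.reverse_append, List.reverse_singleton, List.singleton_append,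
      List.foldl_cons]
    have e1 : ((k : Int) + (nn : Int)) = ((k + nn : Nat) : Int) := by push_cast; ring
    have hbeq := slice_beq s ((k : Int)) ((k : Int) + (nn : Int)) ((k : Int) + (nn : Int))
      ((k : Int) + 2 * (nn : Int)) k (k + nn) nn rfl rfl (by push_cast; ring) (by push_cast; ring)
    have hcond : bDpStep s (nn : Int) r k
        = if (s.toList.drop k).take nn = (s.toList.drop (k + nn)).take nn
          then r.set k (r.getD (k + nn) 1 + 1) else r := by
      simp only [bDpStep, hbeq, decide_eq_true_eq]
      by_cases hc : (s.toList.drop k).take nn = (s.toList.drop (k + nn)).take nn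
      · rw [if_pos hc, if_pos hc, e1, PySem.List.pySetD_natCast, PySem.List.pyGetD_natCast]
      · rw [if_neg hc, if_neg hc]
    by_cases hc : (s.toList.drop k).take nn = (s.toList.drop (k + nn)).take nn
    · rw [hcond, if_pos hc]
      apply ih
      · intro _; omega
      · simpa using hlen
      · intro j hj
        by_cases hjk : j = k
        · subst hjk
          have hknn : r.getD (j + nn) 1 = (CvalN s.toList nn (j + nn) : Int) := by
            rw [hr (j + nn) (by omega), if_pos (by omega)]
          rw [List.getD_eq_getElem?_getD, List.getElem?_set, if_pos rfl,
            if_pos (by omega), Option.getD_some, hknn, if_pos le_rfl,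
            Cval_of_eq hn hkL hc]
          push_cast; ring
        · rw [List.getD_eq_getElem?_getD, List.getElem?_set,
            if_neg (fun h => hjk h.symm), ← List.getD_eq_getElem?_getD, hr j hj]
          by_cases hlt : k ≤ j
          · rw [if_pos (by omega), if_pos hlt]
          · rw [if_neg (by omega), if_neg hlt]
    · rw [hcond, if_neg hc]
      apply ih
      · intro _; omega
      · exact hlen
      · intro j hj
        rw [hr j hj]
        by_cases hjk : j = k
        · subst hjk
          rw [if_neg (by omega), if_pos le_rfl, Cval_one_of_far (by tauto)]
          norm_num
        · by_cases hlt : k ≤ j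
          · rw [if_pos (by omega), if_pos hlt]
          · rw [if_neg (by omega), if_neg hlt]

theorem run_spec (s : String) (nn : Nat) (hn : 0 < nn) :
    (bRun s (nn : Int)).length = s.toList.length ∧
    ∀ j, j < s.toList.length →
      (bRun s (nn : Int)).getD j 1 = (CvalN s.toList nn j : Int) := by
  have hlen : PySem.Str.len s = (s.toList.length : Int) := PySem.Str.len_eq s
  unfold bRun
  rw [hlen]
  apply dp_invar s nn hn
  · intro hne
    omega
  · rw [List.length_replicate]
    omega
  · intro j hj
    rw [List.getD_eq_getElem?_getD]
    have hrep : (List.replicate ((s.toList.length : Int)).toNat (1 : Int))[j]? = some 1 := by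
      rw [List.getElem?_replicate, if_pos (by omega)]
    rw [hrep, Option.getD_some]
    by_cases hge : (((s.toList.length : Int)) - 2 * (nn : Int) + 1).toNat ≤ j
    · rw [if_pos hge, Cval_one_of_far (fun h => by omega)]
      norm_num
    · rw [if_neg hge]

theorem stepEq (s : String) (nn ii : Nat) (hn : 0 < nn) (hiL : ii + nn < s.toList.length)
    (d : PySem.Dict String Int) :
    aStep s (nn : Int) d (ii : Int) = bStep s (nn : Int) (bRun s (nn : Int)) d (ii : Int) := by
  obtain ⟨hrl, hrv⟩ := run_spec s nn hn
  have hc : PySem.List.pyGetD (bRun s (nn : Int)) (ii : Int) 1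
      = (CvalN s.toList nn ii : Int) := by
    rw [PySem.List.pyGetD_natCast]
    exact hrv ii (by omega)
  have hbeq := slice_beq s ((ii : Int) + (nn : Int)) ((ii : Int) + 2 * (nn : Int))
    ((ii : Int)) ((ii : Int) + (nn : Int)) (ii + nn) ii nn
    (by push_cast; ring) (by push_cast; ring) rfl rfl
  simp only [aStep, bStep, hc]
  rw [show (PySem.Str.slice s (some ((ii : Int) + (nn : Int))) (some ((ii : Int) + 2 * (nn : Int)))
        == PySem.Str.slice s (some (ii : Int)) (some ((ii : Int) + (nn : Int))))
      = decide ((s.toList.drop (ii + nn)).take nn = (s.toList.drop ii).take nn) from hbeq]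
  by_cases hg : (s.toList.drop (ii + nn)).take nn = (s.toList.drop ii).take nn
  · rw [if_pos (by simp [hg]), counter_eq s nn ii hn hiL]
    have hCg : (CvalN s.toList nn ii : Int)
        = 1 + (chainC s.toList nn ((s.toList.drop ii).take nn) (ii + nn) : Int) := by
      unfold CvalN; push_cast; ring
    rw [← hCg, update_eq]
  · rw [if_neg (by simp [hg])]
    have h1 : CvalN s.toList nn ii = 1 := Cval_one_of_far (fun h => hg h.2.symm)
    rw [if_neg (by rw [h1]; rintro ⟨h3, -⟩; omega)]

theorem innerEq (s : String) (nn : Nat) (hn : 0 < nn) (d : PySem.Dict String Int) :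
    aInner s (nn : Int) d = bInner s (nn : Int) d := by
  unfold aInner bInner
  apply PySem.List.foldl_congr_mem
  intro acc x hx
  rw [PySem.List.mem_pyRange_one] at hx
  obtain ⟨hx0, hx1⟩ := hx
  rw [PySem.Str.len_eq] at hx1
  have hx' : x = ((x.toNat : Nat) : Int) := by omega
  rw [hx']
  exact stepEq s nn x.toNat hn (by omega) acc

def KeysOK (d : PySem.Dict String Int) : Prop := ∀ k ∈ d.keys, k.toList ≠ []

theorem keysOK_bStep (s : String) (nn : Nat) (hn : 0 < nn) (run : List Int)
    (d : PySem.Dict String Int) (hd : KeysOK d) (i : Int) (h0 : 0 ≤ i)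
    (hiL : i < (s.toList.length : Int)) : KeysOK (bStep s (nn : Int) run d i) := by
  simp only [bStep]
  split_ifs with hcond
  · intro k hk
    rw [PySem.Dict.mem_keys_insert] at hk
    rcases hk with hk | hk
    · subst hk
      have hi : i = ((i.toNat : Nat) : Int) := by omega
      rw [hi, PySem.Str.toList_slice, PySem.Chars.slice_eq_listSlice,
        PySem.List.slice_natCast_add]
      intro hnil
      have := congrArg List.length hnil
      simp only [List.length_take, List.length_drop, List.length_nil] at this
      omega
    · exact hd k hk
  · exact hd

theorem keysOK_bInner (s : String) (nn : Nat) (hn : 0 < nn) (d : PySem.Dict String Int)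
    (hd : KeysOK d) : KeysOK (bInner s (nn : Int) d) := by
  unfold bInner
  refine List.foldlRecOn _ _ hd ?_
  intro acc hacc i hi
  rw [PySem.List.mem_pyRange_one] at hi
  rw [PySem.Str.len_eq] at hi
  exact keysOK_bStep s nn hn _ acc hacc i hi.1 (by omega)

theorem keysOK_empty : KeysOK (PySem.Dict.empty : PySem.Dict String Int) := by
  intro k hk
  simp [PySem.Dict.empty, PySem.Dict.keys] at hk

theorem final_if (D : PySem.Dict String Int) (hK : KeysOK D) :
    (if (D.keys.any fun k => !(PySem.Str.len k == 0)) = false then none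
     else some D.items)
    = if D.items = [] then none else some D.items := by
  by_cases hD : D.items = []
  · have hk0 : D.keys = [] := by
      show D.items.map Prod.fst = []
      rw [hD]
      rfl
    rw [if_pos (by rw [hk0]; rfl), if_pos hD]
  · obtain ⟨⟨k, v⟩, hmem⟩ := List.exists_mem_of_ne_nil _ hD
    have hkmem : k ∈ D.keys := by
      show k ∈ D.items.map Prod.fst
      exact List.mem_map.mpr ⟨(k, v), hmem, rfl⟩
    have hkne : k.toList ≠ [] := hK k hkmem
    have hlen : (PySem.Str.len k == 0) = false := by
      rw [PySem.Str.len_eq]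
      simp only [beq_eq_false_iff_ne, ne_eq, Nat.cast_eq_zero]
      intro h
      exact hkne (List.length_eq_zero_iff.mp h)
    have hany : (D.keys.any fun k => !(PySem.Str.len k == 0)) = true :=
      List.any_eq_true.mpr ⟨k, hkmem, by rw [hlen]; rfl⟩
    rw [if_neg (by rw [hany]; simp), if_neg hD]

-- ===== VERDICT (by name: the statement is the Claim_ definition above) =====
theorem find_ssr_spec : Claim_equal_find_ssr := by
  unfold Claim_equal_find_ssr Spec_find_ssr
  intro s _
  show find_ssr s = find_ssr_alt s
  have hfold : List.foldl (fun d n => aInner s n d) PySem.Dict.empty (PySem.List.pyRange 1 7 1)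
      = List.foldl (fun d n => bInner s n d) PySem.Dict.empty (PySem.List.pyRange 1 7 1) := by
    apply PySem.List.foldl_congr_mem
    intro acc n hn
    rw [PySem.List.mem_pyRange_one] at hn
    have hn' : n = ((n.toNat : Nat) : Int) := by omega
    rw [hn']
    exact innerEq s n.toNat (by omega) acc
  have hK : KeysOK (List.foldl (fun d n => bInner s n d) PySem.Dict.empty
      (PySem.List.pyRange 1 7 1)) := by
    refine List.foldlRecOn _ _ keysOK_empty ?_
    intro acc hacc n hn
    rw [PySem.List.mem_pyRange_one] at hn
    have hn' : n = ((n.toNat : Nat) : Int) := by omega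
    rw [hn']
    exact keysOK_bInner s n.toNat (by omega) acc hacc
  simp only [find_ssr, find_ssr_alt, hfold]
  exact final_if _ hK
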